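-- pv_equiv track=rewrite | github.com/aridepai17/PYTHON-MASTERY | LEETCODE/differencebetweenelementsumanddigitsumoffanarray.py | diffrenceOfSum
-- ===== SOURCE A (Python) =====
-- def diffrenceOfSum(nums):
--     sumnums = sum(nums)
--     sumdigits = 0
--
--     for num in nums:
--         while num > 0:
--             sumdigits += num % 10
--             num //= 10
--     return abs(sumnums - sumdigits)
-- ===== SOURCE B (Python) =====
-- def diffrenceOfSum(nums):
--     # Idiomatic rewrite: digit sum via decimal-string traversal instead of the %/// while loop.
--     digits = "".join(str(num) for num in nums if num > 0)
--     return abs(sum(nums) - sum(int(c) for c in digits))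
-- ===== Notes on version B (the rewrite author's own statement) =====
-- stated objective: idiomatic
-- what changed: Replaces the nested while loop extracting digits arithmetically with %10 and //10 by a filter-and-join of the decimal string representations followed by one sum over their characters.
import Mathlib
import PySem

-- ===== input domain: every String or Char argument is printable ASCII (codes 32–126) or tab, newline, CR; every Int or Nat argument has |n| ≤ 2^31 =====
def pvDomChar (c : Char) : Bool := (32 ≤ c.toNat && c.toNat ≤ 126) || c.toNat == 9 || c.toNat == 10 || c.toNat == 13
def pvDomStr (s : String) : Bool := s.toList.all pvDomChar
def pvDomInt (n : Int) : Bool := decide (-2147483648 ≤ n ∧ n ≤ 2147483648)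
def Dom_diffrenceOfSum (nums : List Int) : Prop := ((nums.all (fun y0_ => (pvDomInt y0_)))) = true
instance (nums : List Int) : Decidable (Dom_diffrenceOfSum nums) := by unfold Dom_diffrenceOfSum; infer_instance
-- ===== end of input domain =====

-- B replaces A's arithmetic %10 // 10 digit loop by a character traversal of the decimal strings (idiomatic rewrite, same cost).


-- ===== PORT A =====
theorem pvFdiv10_toNat_lt (num : Int) (h : 0 < num) : (Int.fdiv num 10).toNat < num.toNat := by
  rw [Int.fdiv_eq_ediv]
  simp only [show ((0:Int) ≤ 10 ∨ (10:Int) ∣ num) from Or.inl (by omega), if_pos]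
  omega

-- 'while num > 0: sumdigits += num % 10; num //= 10' with accumulator sd = sumdigits
def pvDigitLoop (num sd : Int) : Int :=
  if 0 < num then pvDigitLoop (PySem.Int.floordiv num 10) (sd + PySem.Int.mod num 10) else sd
termination_by num.toNat
decreasing_by exact pvFdiv10_toNat_lt num (by assumption)

def diffrenceOfSum (nums : List Int) : Int :=
  let sumnums := nums.foldl (· + ·) 0
  let sumdigits := nums.foldl (fun sd num => pvDigitLoop num sd) 0
  |sumnums - sumdigits|

-- ===== PORT B =====
-- int(c); the default is never reached in B: c is always a decimal digit of str(num) for num > 0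
def pvIntOfChar (c : Char) : Int := (PySem.Int.ofChars? [c]).getD 0

def diffrenceOfSum_alt (nums : List Int) : Int :=
  let digits := (nums.filter (fun num => num > 0)).flatMap (fun num => PySem.Int.toChars num)
  |nums.sum - (digits.map pvIntOfChar).sum|

-- ===== PRECONDITION & SPEC =====
def Spec_diffrenceOfSum (nums : List Int) (out : Int) : Prop := out = diffrenceOfSum_alt nums
instance (nums : List Int) (out : Int) : Decidable (Spec_diffrenceOfSum nums out) := by unfold Spec_diffrenceOfSum; infer_instance

-- ===== CLAIM (what is proved, stated in full; the proofs are below) =====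
def Claim_equal_diffrenceOfSum : Prop := ∀ (nums : List Int), Dom_diffrenceOfSum nums → Spec_diffrenceOfSum nums (diffrenceOfSum nums)

-- ===== LEMMAS AND PROOFS =====

-- abstract digit sum of a natural number
def dsum (n : Nat) : Int :=
  if h : n = 0 then 0 else (n % 10 : Int) + dsum (n / 10)
decreasing_by exact Nat.div_lt_self (Nat.pos_of_ne_zero h) (by omega)

theorem dsum_zero : dsum 0 = 0 := by rw [dsum]; simp

theorem dsum_pos (n : Nat) (h : n ≠ 0) : dsum n = ((n % 10 : Nat) : Int) + dsum (n / 10) := by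
  rw [dsum, dif_neg h]; push_cast; ring

theorem pvDigitLoop_eq (num sd : Int) : pvDigitLoop num sd = sd + dsum num.toNat := by
  generalize hn : num.toNat = n
  induction n using Nat.strong_induction_on generalizing num sd with
  | _ n ih =>
    rw [pvDigitLoop]
    split
    · rename_i hpos
      rw [ih (Int.fdiv num 10).toNat (hn ▸ pvFdiv10_toNat_lt num hpos)
            (PySem.Int.floordiv num 10) _ rfl]
      have h0 : n ≠ 0 := by omega
      rw [dsum_pos n h0]
      have h1 : PySem.Int.mod num 10 = ((n % 10 : Nat) : Int) := by
        simp only [PySem.Int.mod, Int.fmod_eq_emod]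
        omega
      have h2 : (Int.fdiv num 10).toNat = n / 10 := by
        simp only [Int.fdiv_eq_ediv,
          show ((0:Int) ≤ 10 ∨ (10:Int) ∣ num) from Or.inl (by omega), if_pos]
        omega
      rw [h1, h2]; push_cast; ring
    · rename_i hneg
      have : n = 0 := by omega
      simp [this, dsum_zero]

-- character value of a decimal digit char
theorem pvIntOfChar_digitChar (d : Nat) (h : d < 10) : pvIntOfChar (Nat.digitChar d) = (d : Int) := by
  interval_cases d <;> decide

theorem charSum_toDigitsCore (f : Nat) : ∀ (n : Nat) (acc : List Char), n < f →
    ((Nat.toDigitsCore 10 f n acc).map pvIntOfChar).sum = dsum n + ((acc.map pvIntOfChar)).sum := by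
  induction f with
  | zero => intro n acc h; omega
  | succ f ih =>
    intro n acc h
    rw [Nat.toDigitsCore]
    split
    · rename_i hdiv
      simp only [List.map_cons, List.sum_cons]
      rw [pvIntOfChar_digitChar (n % 10) (Nat.mod_lt _ (by omega))]
      by_cases h0 : n = 0
      · simp [h0, dsum_zero]
      · rw [dsum_pos n h0, hdiv, dsum_zero]; push_cast; ring
    · rename_i hdiv
      have hlt : n / 10 < f := by
        have h10 : 10 ≤ n := by
          by_contra hc
          exact hdiv (Nat.div_eq_of_lt (by omega))
        calc n / 10 < n := Nat.div_lt_self (by omega) (by omega)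
          _ ≤ f := by omega
      rw [ih (n / 10) _ hlt]
      simp only [List.map_cons, List.sum_cons]
      rw [pvIntOfChar_digitChar (n % 10) (Nat.mod_lt _ (by omega))]
      have h0 : n ≠ 0 := by
        intro h0; apply hdiv; simp [h0]
      rw [dsum_pos n h0]
      push_cast
      ring

theorem charSum_toChars (num : Int) (h : 0 < num) :
    ((PySem.Int.toChars num).map pvIntOfChar).sum = dsum num.toNat := by
  have : ¬ num < 0 := by omega
  simp only [PySem.Int.toChars, this, if_false, Nat.toDigits]
  rw [charSum_toDigitsCore (num.toNat + 1) num.toNat [] (by omega)]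
  simp

theorem dsum_toNat_nonpos (num : Int) (h : ¬ 0 < num) : dsum num.toNat = 0 := by
  have : num.toNat = 0 := by omega
  rw [this, dsum_zero]

theorem foldl_digitLoop (nums : List Int) : ∀ (sd : Int),
    nums.foldl (fun sd num => pvDigitLoop num sd) sd
      = sd + (nums.map (fun num => dsum num.toNat)).sum := by
  induction nums with
  | nil => intro sd; simp
  | cons x xs ih =>
    intro sd
    rw [List.foldl_cons, ih, pvDigitLoop_eq]
    simp only [List.map_cons, List.sum_cons]
    ring

theorem flatMap_charSum (nums : List Int) :
    (((nums.filter (fun num => num > 0)).flatMap (fun num => PySem.Int.toChars num)).map pvIntOfChar).sum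
      = (nums.map (fun num => dsum num.toNat)).sum := by
  induction nums with
  | nil => simp
  | cons x xs ih =>
    by_cases hx : 0 < x
    · simp only [List.filter_cons, gt_iff_lt, hx, if_pos,
        List.flatMap_cons, List.map_append, List.sum_append, List.map_cons, List.sum_cons, ih,
        charSum_toChars x hx, decide_true]
    · simp only [List.filter_cons, gt_iff_lt, hx, decide_false, Bool.false_eq_true,
        not_false_eq_true, List.map_cons, List.sum_cons, ih, dsum_toNat_nonpos x hx, if_neg]
      omega

-- ===== VERDICT (by name: the statement is the Claim_ definition above) =====
theorem diffrenceOfSum_spec : Claim_equal_diffrenceOfSum := by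
  intro nums _
  show diffrenceOfSum nums = diffrenceOfSum_alt nums
  unfold diffrenceOfSum diffrenceOfSum_alt
  simp only [foldl_digitLoop, flatMap_charSum, ← List.sum_eq_foldl, zero_add]
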